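-- pv_equiv track=rewrite | github.com/eth-siplab/Frequency-weighted-neural-Kalman-filters | get_metrics.py | detect_best_metric
-- ===== SOURCE A (Python) =====
-- from typing import Dict, List, Optional, Tuple
--
-- def detect_best_metric(results: List[Dict]) -> Tuple[str, bool]:
--     """
--     Auto-detect the best metric to optimize based on available metrics.
--
--     Args:
--         results: List of results to analyze
--
--     Returns:
--         Tuple of (metric_name, minimize_flag)
--     """
--     if not results:
--         return "nrmse_mean", True
--
--     sample_result = results[0]
--     available_metrics = [k for k in sample_result.keys() if k.endswith("_mean")]
--
--     # Priority order: prefer NRMSE (lower is better), then R2 (higher is better), then MSE, then MAE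
--     metric_preferences = [
--         ("nrmse_mean", True),
--         ("r2_mean", False),
--         ("mse_mean", True),
--         ("mae_mean", True),
--         ("rmse_mean", True),
--     ]
--
--     for metric, minimize in metric_preferences:
--         if metric in available_metrics:
--             return metric, minimize
--
--     # Fallback to first available metric (assume minimize)
--     if available_metrics:
--         return available_metrics[0], True
--
--     return "nrmse_mean", True
-- ===== SOURCE B (Python) =====
-- def detect_best_metric(results):
--     if not results:
--         return "nrmse_mean", True
--     priority = {
--         "nrmse_mean": (0, True),
--         "r2_mean": (1, False),
--         "mse_mean": (2, True),
--         "mae_mean": (3, True),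
--         "rmse_mean": (4, True),
--     }
--     best = None  # (rank, key, minimize)
--     for k in results[0].keys():
--         if not k.endswith("_mean"):
--             continue
--         rank, minimize = priority.get(k, (5, True))
--         if best is None or rank < best[0]:
--             best = (rank, k, minimize)
--     if best is None:
--         return "nrmse_mean", True
--     return best[1], best[2]
-- ===== Notes on version B (the rewrite author's own statement) =====
-- stated objective: alternative
-- what changed: Instead of scanning the fixed preference list and testing membership in the available-metrics list for each entry, B makes a single pass over the keys of results[0], keeping the candidate with the smallest priority rank (unknown keys rank below all preferred ones, ties broken by first occurrence).
import Mathlib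
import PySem

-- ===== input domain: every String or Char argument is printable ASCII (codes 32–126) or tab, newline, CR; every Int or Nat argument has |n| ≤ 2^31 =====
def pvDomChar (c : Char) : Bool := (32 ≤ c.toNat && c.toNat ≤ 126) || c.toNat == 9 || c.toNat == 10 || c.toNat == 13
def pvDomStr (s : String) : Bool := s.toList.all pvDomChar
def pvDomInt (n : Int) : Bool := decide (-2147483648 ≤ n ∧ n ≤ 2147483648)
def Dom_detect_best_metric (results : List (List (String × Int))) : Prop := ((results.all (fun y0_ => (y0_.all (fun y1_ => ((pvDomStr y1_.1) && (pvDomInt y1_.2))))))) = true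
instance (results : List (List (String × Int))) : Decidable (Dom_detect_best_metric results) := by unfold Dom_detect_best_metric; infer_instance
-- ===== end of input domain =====

-- B replaces A's scan of the preference list (membership test per entry) by a single
-- pass over the sample result's keys maintaining the lowest-rank candidate (alternative decomposition).


-- ===== PORT A =====
-- A's for-loop over metric_preferences with early return
def pvLoopA (available : List String) : List (String × Bool) → String × Bool
  | [] =>
    match available with
    | [] => ("nrmse_mean", true)
    | a :: _ => (a, true)
  | (m, b) :: rest => if available.contains m then (m, b) else pvLoopA available rest

def detect_best_metric (results : List (List (String × Int))) : String × Bool :=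
  match results with
  | [] => ("nrmse_mean", true)
  | d :: _ =>
    let available := ((PySem.Dict.ofList d).keys).filter (fun k => PySem.Str.endswith k "_mean")
    pvLoopA available
      [("nrmse_mean", true), ("r2_mean", false), ("mse_mean", true), ("mae_mean", true), ("rmse_mean", true)]

-- ===== PORT B =====
def pvPriority : PySem.Dict String (Int × Bool) :=
  PySem.Dict.ofList
    [("nrmse_mean", (0, true)), ("r2_mean", (1, false)), ("mse_mean", (2, true)),
     ("mae_mean", (3, true)), ("rmse_mean", (4, true))]

def pvStepB (best : Option (Int × String × Bool)) (k : String) : Option (Int × String × Bool) :=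
  if PySem.Str.endswith k "_mean" then
    let rm := PySem.Dict.getD pvPriority k (5, true)
    match best with
    | none => some (rm.1, k, rm.2)
    | some (r0, k0, m0) => if rm.1 < r0 then some (rm.1, k, rm.2) else some (r0, k0, m0)
  else best

def detect_best_metric_alt (results : List (List (String × Int))) : String × Bool :=
  match results with
  | [] => ("nrmse_mean", true)
  | d :: _ =>
    match ((PySem.Dict.ofList d).keys).foldl pvStepB none with
    | none => ("nrmse_mean", true)
    | some (_, k, m) => (k, m)

-- ===== PRECONDITION & SPEC =====
def Spec_detect_best_metric (results : List (List (String × Int))) (out : String × Bool) : Prop := out = detect_best_metric_alt results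
instance (results : List (List (String × Int))) (out : String × Bool) : Decidable (Spec_detect_best_metric results out) := by unfold Spec_detect_best_metric; infer_instance

-- ===== CLAIM (what is proved, stated in full; the proofs are below) =====
def Claim_equal_detect_best_metric : Prop := ∀ (results : List (List (String × Int))), Dom_detect_best_metric results → Spec_detect_best_metric results (detect_best_metric results)

-- ===== LEMMAS AND PROOFS =====

def pvRk (k : String) : Int := (PySem.Dict.getD pvPriority k (5, true)).1
def pvFl (k : String) : Bool := (PySem.Dict.getD pvPriority k (5, true)).2

-- the unguarded step, acting on the already-filtered list
def pvStep (best : Option (Int × String × Bool)) (k : String) : Option (Int × String × Bool) :=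
  match best with
  | none => some (pvRk k, k, pvFl k)
  | some (r0, k0, m0) => if pvRk k < r0 then some (pvRk k, k, pvFl k) else some (r0, k0, m0)

theorem pvStepB_eq (best : Option (Int × String × Bool)) (k : String) :
    pvStepB best k = if PySem.Str.endswith k "_mean" then pvStep best k else best := by
  cases best <;> simp [pvStepB, pvStep, pvRk, pvFl]

theorem pv_foldl_filter (keys : List String) :
    keys.foldl pvStepB none
      = (keys.filter (fun k => PySem.Str.endswith k "_mean")).foldl pvStep none := by
  have h : pvStepB = fun acc k => if PySem.Str.endswith k "_mean" then pvStep acc k else acc :=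
    funext fun acc => funext fun k => pvStepB_eq acc k
  rw [List.foldl_filter, h]

theorem pvRk_cases (x : String) :
    (x = "nrmse_mean" ∧ pvRk x = 0 ∧ pvFl x = true) ∨
    (x = "r2_mean" ∧ pvRk x = 1 ∧ pvFl x = false) ∨
    (x = "mse_mean" ∧ pvRk x = 2 ∧ pvFl x = true) ∨
    (x = "mae_mean" ∧ pvRk x = 3 ∧ pvFl x = true) ∨
    (x = "rmse_mean" ∧ pvRk x = 4 ∧ pvFl x = true) ∨
    (pvRk x = 5 ∧ pvFl x = true) := by
  by_cases h0 : x = "nrmse_mean"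
  · subst h0; left; exact ⟨rfl, by decide, by decide⟩
  by_cases h1 : x = "r2_mean"
  · subst h1; right; left; exact ⟨rfl, by decide, by decide⟩
  by_cases h2 : x = "mse_mean"
  · subst h2; right; right; left; exact ⟨rfl, by decide, by decide⟩
  by_cases h3 : x = "mae_mean"
  · subst h3; right; right; right; left; exact ⟨rfl, by decide, by decide⟩
  by_cases h4 : x = "rmse_mean"
  · subst h4; right; right; right; right; left; exact ⟨rfl, by decide, by decide⟩
  · right; right; right; right; right
    have g0 : ("nrmse_mean" == x) = false := by simp [Ne.symm h0]
    have g1 : ("r2_mean" == x) = false := by simp [Ne.symm h1]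
    have g2 : ("mse_mean" == x) = false := by simp [Ne.symm h2]
    have g3 : ("mae_mean" == x) = false := by simp [Ne.symm h3]
    have g4 : ("rmse_mean" == x) = false := by simp [Ne.symm h4]
    constructor <;>
      simp [pvRk, pvFl, pvPriority, PySem.Dict.getD, PySem.Dict.get?, PySem.Dict.ofList,
        PySem.Dict.update, PySem.Dict.insert, PySem.Dict.empty, PySem.Dict.contains,
        g0, g1, g2, g3, g4]

theorem pvStay (L : List String) (r : Int) (k : String) (m : Bool)
    (h : ∀ x ∈ L, ¬ (pvRk x < r)) :
    L.foldl pvStep (some (r, k, m)) = some (r, k, m) := by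
  induction L with
  | nil => rfl
  | cons y ys ih =>
    have hy := h y (by simp)
    simp only [List.foldl_cons, pvStep, if_neg hy]
    exact ih (fun x hx => h x (by simp [hx]))

theorem pvHit (L : List String) (acc : Option (Int × String × Bool)) (r : Int) (name : String) (flag : Bool)
    (hex : ∃ x ∈ L, pvRk x = r)
    (hmin : ∀ x ∈ L, r ≤ pvRk x)
    (huniq : ∀ x, pvRk x = r → x = name ∧ pvFl x = flag)
    (hacc : acc = none ∨ ∃ r0 k0 m0, acc = some (r0, k0, m0) ∧ r < r0) :
    L.foldl pvStep acc = some (r, name, flag) := by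
  induction L generalizing acc with
  | nil => rcases hex with ⟨x, hx, _⟩; cases hx
  | cons y ys ih =>
    by_cases hy : pvRk y = r
    · obtain ⟨hyn, hyf⟩ := huniq y hy
      have hstep : pvStep acc y = some (r, name, flag) := by
        rcases hacc with h | ⟨r0, k0, m0, h, hlt⟩
        · subst h; simp only [pvStep]; rw [hy, hyf, hyn]
        · subst h; simp only [pvStep]; rw [hy, if_pos hlt, hyf, hyn]
      simp only [List.foldl_cons, hstep]
      exact pvStay ys r name flag (fun x hx => not_lt.mpr (hmin x (by simp [hx])))
    · have hex' : ∃ x ∈ ys, pvRk x = r := by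
        rcases hex with ⟨x, hx, hxr⟩
        rcases List.mem_cons.mp hx with h | h
        · exact absurd (h ▸ hxr) hy
        · exact ⟨x, h, hxr⟩
      have hry : r < pvRk y := lt_of_le_of_ne (hmin y (by simp)) (Ne.symm hy)
      have hacc' : pvStep acc y = none ∨ ∃ r0 k0 m0, pvStep acc y = some (r0, k0, m0) ∧ r < r0 := by
        rcases hacc with h | ⟨r0, k0, m0, h, hlt⟩
        · subst h; right; exact ⟨pvRk y, y, pvFl y, rfl, hry⟩
        · subst h; right
          by_cases hc : pvRk y < r0
          · exact ⟨pvRk y, y, pvFl y, by simp [pvStep, hc], hry⟩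
          · exact ⟨r0, k0, m0, by simp [pvStep, hc], hlt⟩
      simp only [List.foldl_cons]
      exact ih _ hex' (fun x hx => hmin x (by simp [hx])) hacc'

theorem pvFall (L : List String) (y : String)
    (h : ∀ x ∈ y :: L, pvRk x = 5 ∧ pvFl x = true) :
    (y :: L).foldl pvStep none = some (5, y, true) := by
  obtain ⟨hy5, hyf⟩ := h y (by simp)
  simp only [List.foldl_cons, pvStep, hy5, hyf]
  exact pvStay L 5 y true (fun x hx => by have := (h x (by simp [hx])).1; omega)

-- names of the preference table, by index; rank r determines name and flag for r < 5
theorem pvUniq (r : Int) (name : String) (flag : Bool)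
    (h : (r = 0 ∧ name = "nrmse_mean" ∧ flag = true) ∨ (r = 1 ∧ name = "r2_mean" ∧ flag = false) ∨
         (r = 2 ∧ name = "mse_mean" ∧ flag = true) ∨ (r = 3 ∧ name = "mae_mean" ∧ flag = true) ∨
         (r = 4 ∧ name = "rmse_mean" ∧ flag = true)) :
    ∀ x, pvRk x = r → x = name ∧ pvFl x = flag := by
  intro x hx
  rcases pvRk_cases x with ⟨he, hr, hf⟩ | ⟨he, hr, hf⟩ | ⟨he, hr, hf⟩ | ⟨he, hr, hf⟩ | ⟨he, hr, hf⟩ | ⟨hr, hf⟩ <;>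
    rcases h with ⟨h1, h2, h3⟩ | ⟨h1, h2, h3⟩ | ⟨h1, h2, h3⟩ | ⟨h1, h2, h3⟩ | ⟨h1, h2, h3⟩ <;>
    first
      | (exfalso; omega)
      | (exact ⟨by rw [he, h2], by rw [hf, h3]⟩)


theorem pvRk_nonneg (x : String) : 0 ≤ pvRk x := by
  rcases pvRk_cases x with ⟨_, hr, _⟩ | ⟨_, hr, _⟩ | ⟨_, hr, _⟩ | ⟨_, hr, _⟩ | ⟨_, hr, _⟩ | ⟨hr, _⟩ <;> omega

theorem pvMain (L : List String) :
    pvLoopA L [("nrmse_mean", true), ("r2_mean", false), ("mse_mean", true), ("mae_mean", true), ("rmse_mean", true)]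
      = (match L.foldl pvStep none with
         | none => ("nrmse_mean", true)
         | some (_, k, m) => (k, m)) := by
  by_cases c0 : "nrmse_mean" ∈ L
  · have hB := pvHit L none 0 "nrmse_mean" true ⟨"nrmse_mean", c0, by decide⟩
      (fun x _ => pvRk_nonneg x) (pvUniq 0 _ _ (by simp)) (Or.inl rfl)
    simp [pvLoopA, c0, hB]
  · by_cases c1 : "r2_mean" ∈ L
    · have hmin : ∀ x ∈ L, 1 ≤ pvRk x := fun x hx => by
        rcases pvRk_cases x with ⟨he, hr, _⟩ | ⟨_, hr, _⟩ | ⟨_, hr, _⟩ | ⟨_, hr, _⟩ | ⟨_, hr, _⟩ | ⟨hr, _⟩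
        · exact absurd (he ▸ hx) c0
        all_goals omega
      have hB := pvHit L none 1 "r2_mean" false ⟨"r2_mean", c1, by decide⟩
        hmin (pvUniq 1 _ _ (by simp)) (Or.inl rfl)
      simp [pvLoopA, c0, c1, hB]
    · by_cases c2 : "mse_mean" ∈ L
      · have hmin : ∀ x ∈ L, 2 ≤ pvRk x := fun x hx => by
          rcases pvRk_cases x with ⟨he, hr, _⟩ | ⟨he, hr, _⟩ | ⟨_, hr, _⟩ | ⟨_, hr, _⟩ | ⟨_, hr, _⟩ | ⟨hr, _⟩
          · exact absurd (he ▸ hx) c0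
          · exact absurd (he ▸ hx) c1
          all_goals omega
        have hB := pvHit L none 2 "mse_mean" true ⟨"mse_mean", c2, by decide⟩
          hmin (pvUniq 2 _ _ (by simp)) (Or.inl rfl)
        simp [pvLoopA, c0, c1, c2, hB]
      · by_cases c3 : "mae_mean" ∈ L
        · have hmin : ∀ x ∈ L, 3 ≤ pvRk x := fun x hx => by
            rcases pvRk_cases x with ⟨he, hr, _⟩ | ⟨he, hr, _⟩ | ⟨he, hr, _⟩ | ⟨_, hr, _⟩ | ⟨_, hr, _⟩ | ⟨hr, _⟩
            · exact absurd (he ▸ hx) c0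
            · exact absurd (he ▸ hx) c1
            · exact absurd (he ▸ hx) c2
            all_goals omega
          have hB := pvHit L none 3 "mae_mean" true ⟨"mae_mean", c3, by decide⟩
            hmin (pvUniq 3 _ _ (by simp)) (Or.inl rfl)
          simp [pvLoopA, c0, c1, c2, c3, hB]
        · by_cases c4 : "rmse_mean" ∈ L
          · have hmin : ∀ x ∈ L, 4 ≤ pvRk x := fun x hx => by
              rcases pvRk_cases x with ⟨he, hr, _⟩ | ⟨he, hr, _⟩ | ⟨he, hr, _⟩ | ⟨he, hr, _⟩ | ⟨_, hr, _⟩ | ⟨hr, _⟩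
              · exact absurd (he ▸ hx) c0
              · exact absurd (he ▸ hx) c1
              · exact absurd (he ▸ hx) c2
              · exact absurd (he ▸ hx) c3
              all_goals omega
            have hB := pvHit L none 4 "rmse_mean" true ⟨"rmse_mean", c4, by decide⟩
              hmin (pvUniq 4 _ _ (by simp)) (Or.inl rfl)
            simp [pvLoopA, c0, c1, c2, c3, c4, hB]
          · have h5 : ∀ x ∈ L, pvRk x = 5 ∧ pvFl x = true := fun x hx => by
              rcases pvRk_cases x with ⟨he, _, _⟩ | ⟨he, _, _⟩ | ⟨he, _, _⟩ | ⟨he, _, _⟩ | ⟨he, _, _⟩ | ⟨hr, hf⟩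
              · exact absurd (he ▸ hx) c0
              · exact absurd (he ▸ hx) c1
              · exact absurd (he ▸ hx) c2
              · exact absurd (he ▸ hx) c3
              · exact absurd (he ▸ hx) c4
              · exact ⟨hr, hf⟩
            match L, h5 with
            | [], _ => simp [pvLoopA, c0, c1, c2, c3, c4]
            | y :: ys, h5 =>
              rw [pvFall ys y h5]
              simp [pvLoopA, c0, c1, c2, c3, c4]

-- ===== VERDICT (by name: the statement is the Claim_ definition above) =====
theorem detect_best_metric_spec : Claim_equal_detect_best_metric := by
  intro results _
  unfold Spec_detect_best_metric
  match results with
  | [] => rfl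
  | d :: rest =>
    simp only [detect_best_metric, detect_best_metric_alt, pv_foldl_filter]
    exact pvMain _
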